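-- pv_equiv track=rewrite | github.com/nrprice/GBA_course_data_forecasting_dashboard | app.py | create_grid_cords
-- ===== SOURCE A (Python) =====
-- def create_grid_cords(plots_needed):
--     """When given the plots_needed, returns a list of subplot coordinates for plots_needed amount of plots"""
--
--     if plots_needed % 2 != 0:
--         plots_needed += 1
--
--     # Rows
--     n1 = ([1, 2] * (plots_needed // 2))
--     n1.sort()
--
--     # Columns
--     n2 = range(1, (plots_needed // 2) + 1)
--     n2 = list(n2) * 2
--
--     cords_list = [[x, y] for (x, y) in zip(n1, n2)]
--
--     return cords_list
-- ===== SOURCE B (Python) =====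
-- def create_grid_cords(plots_needed):
--     """When given the plots_needed, returns a list of subplot coordinates for plots_needed amount of plots"""
--     if plots_needed % 2 != 0:
--         plots_needed += 1
--     half = plots_needed // 2
--     return [[r, c] for r in (1, 2) for c in range(1, half + 1)]
-- ===== Notes on version B (the rewrite author's own statement) =====
-- stated objective: simpler
-- what changed: B enumerates the two-row grid directly with one nested comprehension over rows and columns, instead of building two parallel lists, sorting one of them, and zipping them together.
import Mathlib
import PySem

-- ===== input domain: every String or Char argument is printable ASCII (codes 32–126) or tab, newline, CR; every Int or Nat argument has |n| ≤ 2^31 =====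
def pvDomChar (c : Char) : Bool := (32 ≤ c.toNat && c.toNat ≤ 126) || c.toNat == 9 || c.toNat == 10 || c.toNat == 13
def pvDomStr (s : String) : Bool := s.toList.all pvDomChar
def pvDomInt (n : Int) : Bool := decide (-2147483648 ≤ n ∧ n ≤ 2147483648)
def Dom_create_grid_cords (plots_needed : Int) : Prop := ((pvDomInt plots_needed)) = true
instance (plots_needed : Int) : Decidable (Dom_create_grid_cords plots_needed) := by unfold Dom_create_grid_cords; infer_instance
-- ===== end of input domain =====

-- B replaces A's build-two-lists/sort/zip with a single nested enumeration of the 2×half grid (objective: simpler).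

-- ===== PORT A =====
-- Python list repetition xs * k (k ≤ 0 gives []); exact
def pyListMul {α : Type} (xs : List α) (k : Int) : List α := (List.replicate k.toNat xs).flatten

def create_grid_cords (plots_needed : Int) : List (List Int) :=
  let p := if PySem.Int.mod plots_needed 2 ≠ 0 then plots_needed + 1 else plots_needed
  -- Rows: n1 = [1, 2] * (p // 2); n1.sort()
  let n1 := PySem.List.sorted (pyListMul ([1, 2] : List Int) (PySem.Int.floordiv p 2)) (fun x => x) false
  -- Columns: n2 = list(range(1, p // 2 + 1)) * 2
  let n2 := pyListMul (PySem.List.pyRange 1 (PySem.Int.floordiv p 2 + 1) 1) 2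
  (n1.zip n2).map (fun xy => [xy.1, xy.2])

-- ===== PORT B =====
def create_grid_cords_alt (plots_needed : Int) : List (List Int) :=
  let p := if PySem.Int.mod plots_needed 2 ≠ 0 then plots_needed + 1 else plots_needed
  let half := PySem.Int.floordiv p 2
  ([1, 2] : List Int).flatMap (fun r => (PySem.List.pyRange 1 (half + 1) 1).map (fun c => [r, c]))

-- ===== PRECONDITION & SPEC =====
def Spec_create_grid_cords (plots_needed : Int) (out : List (List Int)) : Prop := out = create_grid_cords_alt plots_needed
instance (plots_needed : Int) (out : List (List Int)) : Decidable (Spec_create_grid_cords plots_needed out) := by unfold Spec_create_grid_cords; infer_instance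

-- ===== CLAIM (what is proved, stated in full; the proofs are below) =====
def Claim_equal_create_grid_cords : Prop := ∀ (plots_needed : Int), Dom_create_grid_cords plots_needed → Spec_create_grid_cords plots_needed (create_grid_cords plots_needed)

-- ===== LEMMAS AND PROOFS =====

-- flatten of m copies of [a, b] is a permutation of (m copies of a) ++ (m copies of b)
theorem flatten_replicate_pair {α : Type} (a b : α) (m : Nat) :
    (List.replicate m ([a, b] : List α)).flatten.Perm
      (List.replicate m a ++ List.replicate m b) := by
  induction m with
  | zero => simp
  | succ k ih =>
    simp only [List.replicate_succ, List.flatten_cons, List.cons_append, List.nil_append]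
    exact .cons a ((ih.cons b).trans List.perm_middle.symm)

-- Python's sort of m copies of 1 and m copies of 2 (interleaved) is rep 1 ++ rep 2
theorem sorted_flatten_pair (m : Nat) :
    PySem.List.sorted ((List.replicate m ([1, 2] : List Int)).flatten) (fun x => x) false
      = List.replicate m (1 : Int) ++ List.replicate m 2 := by
  apply PySem.List.sorted_id_eq_of_perm_of_pairwise
  · exact (flatten_replicate_pair 1 2 m).symm
  · apply List.pairwise_append.2
    refine ⟨List.pairwise_replicate.2 (by simp), List.pairwise_replicate.2 (by simp), ?_⟩
    intro x hx y hy
    simp only [List.mem_replicate] at hx hy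
    omega

theorem zip_replicate_map {α β γ : Type} (x : α) (rg : List β) (f : α × β → γ) :
    ((List.replicate rg.length x).zip rg).map f = rg.map (fun c => f (x, c)) := by
  induction rg with
  | nil => simp
  | cons c t ih => simp [List.replicate_succ, ih]

theorem grid_core (h : Int) :
    (((PySem.List.sorted (pyListMul ([1, 2] : List Int) h) (fun x => x) false).zip
        (pyListMul (PySem.List.pyRange 1 (h + 1) 1) 2)).map (fun xy => [xy.1, xy.2]))
      = ([1, 2] : List Int).flatMap
          (fun r => (PySem.List.pyRange 1 (h + 1) 1).map (fun c => [r, c])) := by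
  set rg := PySem.List.pyRange 1 (h + 1) 1 with hrg
  have hlen : rg.length = h.toNat := by
    simp [hrg, PySem.List.length_pyRange_one]
  have h2 : pyListMul rg 2 = rg ++ rg := by
    simp [pyListMul, List.replicate_succ]
  have h1 : pyListMul ([1, 2] : List Int) h = (List.replicate h.toNat ([1, 2] : List Int)).flatten := rfl
  rw [h1, h2, sorted_flatten_pair h.toNat, ← hlen,
      List.zip_append (by simp), List.map_append,
      zip_replicate_map, zip_replicate_map]
  simp

-- ===== VERDICT (by name: the statement is the Claim_ definition above) =====
theorem create_grid_cords_spec : Claim_equal_create_grid_cords := by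
  intro n _
  unfold Spec_create_grid_cords create_grid_cords create_grid_cords_alt
  exact grid_core _
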